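-- pv_equiv track=rewrite | github.com/donnerc/pyminicp | nqueens_dfs_prune_maxconflict.py | mid_first
-- ===== SOURCE A (Python) =====
-- def mid_first(values: list[int]) -> list[int]:
--     '''
--     Return the values in a "mid-first" order.
--     >>> mid_first([0, 1, 2, 3])
--     [2, 1, 3, 0]
--     >>> mid_first([0, 1, 2, 3, 4])
--     [2, 3, 1, 4, 0]
--     >>> mid_first([0, 1, 2, 3, 4, 5])
--     [3, 2, 4, 1, 5, 0]
--     '''
--     n = len(values)
--     mid = n // 2
--     result = []
--     for i in range(n):
--         if n % 2 == 1:
--             if i % 2 == 0: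
--                 result.append(values[mid - i // 2])
--             else:
--                 result.append(values[mid + (i + 1) // 2])
--         else:
--             if i % 2 == 0:
--                 result.append(values[mid + i // 2])
--             else:
--                 result.append(values[mid - (i + 2) // 2])
--     return result
-- ===== SOURCE B (Python) =====
-- def mid_first(values):
--     n = len(values)
--     if n == 0:
--         return []
--     mid = n // 2
--     result = [values[mid]]
--     for step in range(1, mid + 1):
--         if n % 2 == 1:
--             result.append(values[mid + step])
--             result.append(values[mid - step])
--         else:
--             result.append(values[mid - step])
--             if mid + step < n:
--                 result.append(values[mid + step])
--     return result
-- ===== Notes on version B (the rewrite author's own statement) =====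
-- stated objective: alternative
-- what changed: Replaces A's single pass computing a parity-dependent floor-division index formula for every output position with an outward two-pointer walk: start at the middle element and emit mirrored left/right neighbours step by step, with a bounds check on the last even step.
import Mathlib
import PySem

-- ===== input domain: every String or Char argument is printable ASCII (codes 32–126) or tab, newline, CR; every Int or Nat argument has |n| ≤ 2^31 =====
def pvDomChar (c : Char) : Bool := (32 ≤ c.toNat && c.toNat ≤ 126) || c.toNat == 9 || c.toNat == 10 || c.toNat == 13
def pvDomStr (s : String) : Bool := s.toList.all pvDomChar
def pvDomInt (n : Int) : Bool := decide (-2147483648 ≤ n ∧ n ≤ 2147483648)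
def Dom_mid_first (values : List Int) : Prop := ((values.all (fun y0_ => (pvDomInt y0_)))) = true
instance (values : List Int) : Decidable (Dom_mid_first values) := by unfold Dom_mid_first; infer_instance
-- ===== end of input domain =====

-- B replaces A's single index-arithmetic pass with an outward two-pointer walk from the
-- middle (objective: alternative decomposition, same cost).

-- ===== PORT A =====
-- A's indices are always in range and nonnegative (i // 2 etc. on nonnegative ints equals
-- Nat division, and the subtractions never go below 0), so Nat arithmetic and List.getD
-- are exact for Python's floor division, index arithmetic and values[...] here.
def mid_first (values : List Int) : List Int :=
  let n := values.length
  let mid := n / 2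
  (List.range n).foldl (fun result i =>
    if n % 2 = 1 then
      if i % 2 = 0 then result ++ [values.getD (mid - i / 2) 0]
      else result ++ [values.getD (mid + (i + 1) / 2) 0]
    else
      if i % 2 = 0 then result ++ [values.getD (mid + i / 2) 0]
      else result ++ [values.getD (mid - (i + 2) / 2) 0]) []

-- ===== PORT B =====
-- range(1, mid+1) is List.range' 1 mid; all indices are in range and nonnegative, so
-- List.getD is exact for values[...] here.
def mid_first_alt (values : List Int) : List Int :=
  let n := values.length
  if n = 0 then []
  else
    let mid := n / 2
    (List.range' 1 mid).foldl (fun result step =>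
      if n % 2 = 1 then
        result ++ [values.getD (mid + step) 0] ++ [values.getD (mid - step) 0]
      else
        let r := result ++ [values.getD (mid - step) 0]
        if mid + step < n then r ++ [values.getD (mid + step) 0] else r)
      [values.getD mid 0]

-- ===== PRECONDITION & SPEC =====
def Spec_mid_first (values : List Int) (out : List Int) : Prop := out = mid_first_alt values
instance (values : List Int) (out : List Int) : Decidable (Spec_mid_first values out) := by unfold Spec_mid_first; infer_instance

-- ===== CLAIM (what is proved, stated in full; the proofs are below) =====
def Claim_equal_mid_first : Prop := ∀ (values : List Int), Dom_mid_first values → Spec_mid_first values (mid_first values)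

-- ===== LEMMAS AND PROOFS =====

-- List.range'_1_concat with the concatenated element given in any arithmetic form
theorem pv_range'_concat (s n m : Nat) (hm : m = s + n) :
    List.range' s (n + 1) = List.range' s n ++ [m] := by
  subst hm; rw [List.range'_1_concat]

-- a foldl whose step only appends h x is the flat-map of h
theorem pv_foldl_append {α β : Type} (f : List β → α → List β) (h : α → List β)
    (hf : ∀ r x, f r x = r ++ h x) :
    ∀ (l : List α) (init : List β),
      l.foldl f init = init ++ l.flatMap h := by
  intro l
  induction l with
  | nil => intro init; simp
  | cons x xs ih => intro init; simp [List.foldl, hf, ih]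

-- paired reading of A's loop over an odd range 2k+1
theorem pvA_odd (v : Nat → Int) (m : Nat) :
    ∀ k : Nat,
      (List.range (2 * k + 1)).flatMap (fun i =>
        if i % 2 = 0 then [v (m - i / 2)] else [v (m + (i + 1) / 2)]) =
      v m :: (List.range' 1 k).flatMap (fun s => [v (m + s), v (m - s)]) := by
  intro k
  induction k with
  | zero => simp
  | succ k ih =>
    have h1 : 2 * (k + 1) + 1 = (2 * k + 1) + 1 + 1 := by omega
    rw [h1, List.range_succ, List.range_succ, List.flatMap_append, List.flatMap_append, ih]
    have h2 : List.range' 1 (k + 1) = List.range' 1 k ++ [k + 1] := pv_range'_concat _ _ _ (by omega)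
    rw [h2, List.flatMap_append]
    have e1 : (2 * k + 1) % 2 = 1 := by omega
    have e2 : ((2 * k + 1) + 1) % 2 = 0 := by omega
    have e3 : ((2 * k + 1) + 1) / 2 = k + 1 := by omega
    simp [e1, e2, e3]

-- paired reading of A's loop over an even range 2k
theorem pvA_even (v : Nat → Int) (m : Nat) :
    ∀ k : Nat,
      (List.range (2 * k)).flatMap (fun i =>
        if i % 2 = 0 then [v (m + i / 2)] else [v (m - (i + 2) / 2)]) =
      (List.range' 0 k).flatMap (fun s => [v (m + s), v (m - s - 1)]) := by
  intro k
  induction k with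
  | zero => simp
  | succ k ih =>
    have h1 : 2 * (k + 1) = (2 * k) + 1 + 1 := by omega
    rw [h1, List.range_succ, List.range_succ, List.flatMap_append, List.flatMap_append, ih]
    have h2 : List.range' 0 (k + 1) = List.range' 0 k ++ [k] := pv_range'_concat _ _ _ (by omega)
    rw [h2, List.flatMap_append]
    have e1 : (2 * k) % 2 = 0 := by omega
    have e2 : (2 * k) / 2 = k := by omega
    have e3 : ((2 * k) + 1) % 2 = 1 := by omega
    have e4 : ((2 * k) + 1 + 2) / 2 = k + 1 := by omega
    simp [e1, e2, e3]
    congr 1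
    omega

-- regrouping: a0 b0 a1 b1 … a_k b_k  =  a0 | b0 a1 | b1 a2 | … | b_{k-1} a_k | b_k
theorem pv_regroup (a b : Nat → Int) :
    ∀ k : Nat,
      (List.range' 0 (k + 1)).flatMap (fun s => [a s, b s]) =
      a 0 :: ((List.range' 1 k).flatMap (fun s => [b (s - 1), a s]) ++ [b k]) := by
  intro k
  induction k with
  | zero => simp
  | succ k ih =>
    have h1 : List.range' 0 (k + 1 + 1) = List.range' 0 (k + 1) ++ [k + 1] :=
      pv_range'_concat _ _ _ (by omega)
    have h2 : List.range' 1 (k + 1) = List.range' 1 k ++ [k + 1] := pv_range'_concat _ _ _ (by omega)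
    rw [h1, List.flatMap_append, ih, h2, List.flatMap_append]
    simp

-- two-pointer pairs with the bound check: last pair is truncated
theorem pvB_even (v : Nat → Int) (k : Nat) :
    (List.range' 1 (k + 1)).flatMap (fun s =>
        if (k + 1) + s < 2 * (k + 1) then [v ((k + 1) - s), v ((k + 1) + s)]
        else [v ((k + 1) - s)]) =
    (List.range' 1 k).flatMap (fun s => [v ((k + 1) - s), v ((k + 1) + s)]) ++ [v 0] := by
  have h2 : List.range' 1 (k + 1) = List.range' 1 k ++ [k + 1] :=
    pv_range'_concat _ _ _ (by omega)
  rw [h2, List.flatMap_append]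
  have hlast : ¬ ((k + 1) + (k + 1) < 2 * (k + 1)) := by omega
  simp only [List.flatMap_cons, List.flatMap_nil, List.append_nil, hlast, if_false]
  congr 1
  · apply List.flatMap_congr
    intro s hs
    have : s < k + 1 := by
      have := List.mem_range'.mp hs
      omega
    have : (k + 1) + s < 2 * (k + 1) := by omega
    simp [this]
  · simp

theorem mid_first_eq_alt (values : List Int) : mid_first values = mid_first_alt values := by
  unfold mid_first mid_first_alt
  by_cases h0 : values.length = 0
  · simp [h0]
  rw [if_neg h0]
  rw [pv_foldl_append _
        (fun i => if values.length % 2 = 1 then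
            (if i % 2 = 0 then [values.getD (values.length / 2 - i / 2) 0]
             else [values.getD (values.length / 2 + (i + 1) / 2) 0])
          else
            (if i % 2 = 0 then [values.getD (values.length / 2 + i / 2) 0]
             else [values.getD (values.length / 2 - (i + 2) / 2) 0]))
        (by intro r i
            by_cases h1 : values.length % 2 = 1 <;> by_cases h2 : i % 2 = 0 <;>
              simp [h1, h2])]
  rw [pv_foldl_append _
        (fun step => if values.length % 2 = 1 then
            [values.getD (values.length / 2 + step) 0, values.getD (values.length / 2 - step) 0]
          else
            (if values.length / 2 + step < values.length then
               [values.getD (values.length / 2 - step) 0, values.getD (values.length / 2 + step) 0]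
             else [values.getD (values.length / 2 - step) 0]))
        (by intro r s
            by_cases h1 : values.length % 2 = 1 <;>
              by_cases h2 : values.length / 2 + s < values.length <;> simp [h1, h2])]
  simp only [List.nil_append]
  by_cases hpar : values.length % 2 = 1
  -- odd length: n = 2*m + 1, mid = m
  · obtain ⟨m, hm⟩ : ∃ m, values.length = 2 * m + 1 := ⟨values.length / 2, by omega⟩
    have hmid : values.length / 2 = m := by omega
    rw [List.flatMap_congr (l := List.range values.length)
          (g := fun i => if i % 2 = 0 then [values.getD (m - i / 2) 0]
                         else [values.getD (m + (i + 1) / 2) 0])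
          (by intro i _; simp [hpar, hmid])]
    rw [List.flatMap_congr (l := List.range' 1 (values.length / 2))
          (g := fun s => [values.getD (m + s) 0, values.getD (m - s) 0])
          (by intro s _; simp [hpar, hmid])]
    have hdiv : (2 * m + 1) / 2 = m := by omega
    rw [hm, hdiv, pvA_odd (fun j => values.getD j 0) m m]
    simp
  -- even length: n = 2*(k+1), mid = k+1
  · obtain ⟨k, hm⟩ : ∃ k, values.length = 2 * (k + 1) := ⟨values.length / 2 - 1, by omega⟩
    have hmid : values.length / 2 = k + 1 := by omega
    rw [List.flatMap_congr (l := List.range values.length)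
          (g := fun i => if i % 2 = 0 then [values.getD (k + 1 + i / 2) 0]
                         else [values.getD (k + 1 - (i + 2) / 2) 0])
          (by intro i _; simp [hpar, hmid])]
    rw [List.flatMap_congr (l := List.range' 1 (values.length / 2))
          (g := fun s => if k + 1 + s < 2 * (k + 1) then
                           [values.getD (k + 1 - s) 0, values.getD (k + 1 + s) 0]
                         else [values.getD (k + 1 - s) 0])
          (by intro s _; simp [hm])]
    have hdiv : 2 * (k + 1) / 2 = k + 1 := by omega
    rw [hm, hdiv, pvA_even (fun j => values.getD j 0) (k + 1) (k + 1)]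
    rw [pv_regroup (fun s => values.getD (k + 1 + s) 0)
          (fun s => values.getD (k + 1 - s - 1) 0) k]
    rw [pvB_even (fun j => values.getD j 0) k]
    have hbk : k + 1 - k - 1 = 0 := by omega
    have hF : (List.range' 1 k).flatMap
          (fun s => [values.getD (k + 1 - (s - 1) - 1) 0, values.getD (k + 1 + s) 0]) =
        (List.range' 1 k).flatMap
          (fun s => [values.getD (k + 1 - s) 0, values.getD (k + 1 + s) 0]) := by
      apply List.flatMap_congr
      intro s hs
      have hs' : 1 ≤ s ∧ s < k + 1 := by
        have := List.mem_range'.mp hs; omega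
      have h1 : k + 1 - (s - 1) - 1 = k + 1 - s := by omega
      rw [h1]
    simp only [hbk, hF, List.cons_append, List.nil_append]

-- ===== VERDICT (by name: the statement is the Claim_ definition above) =====
theorem mid_first_spec : Claim_equal_mid_first := by
  intro values _
  unfold Spec_mid_first
  exact mid_first_eq_alt values
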